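-- pv_equiv track=rewrite | github.com/nikhilniksss/Data-Structure-Algorithm | 2.Two Pointers/4.valid word abbreviation E.py | valid_abbreviation
-- ===== SOURCE A (Python) =====
-- def valid_abbreviation(word):
--     i = j = 0
--     while j < len(abbr):
--         if abbr[j].isdigit():
--             if abbr[j] == 0:
--                 return False
--             num = 0
--             while j < len(abbr) and abbr[j].isdigit():
--                 num = num * 10 + int(abbr[j])
--                 j += 1
--             i += num
--         else:
--             if i >= len(word) or word[i] != abbr[j]:
--                 return False
--             i += 1
--             j += 1
--     return i == len(word) and j == len(abbr)
--
-- abbr = "abbreviation"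
-- ===== SOURCE B (Python) =====
-- abbr = "abbreviation"
--
-- def valid_abbreviation(word):
--     # abbr is the fixed constant "abbreviation", which contains no digits,
--     # so the abbreviation check reduces to an aligned positional comparison.
--     if len(word) != len(abbr):
--         return False
--     for i in range(len(word)):
--         if word[i] != abbr[i]:
--             return False
--     return True
-- ===== Notes on version B (the rewrite author's own statement) =====
-- stated objective: simpler
-- what changed: Since the fixed module constant abbr contains no digit characters, B replaces A's two-pointer loop with digit-run expansion by a length check plus a single aligned index-by-index comparison.
import Mathlib
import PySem

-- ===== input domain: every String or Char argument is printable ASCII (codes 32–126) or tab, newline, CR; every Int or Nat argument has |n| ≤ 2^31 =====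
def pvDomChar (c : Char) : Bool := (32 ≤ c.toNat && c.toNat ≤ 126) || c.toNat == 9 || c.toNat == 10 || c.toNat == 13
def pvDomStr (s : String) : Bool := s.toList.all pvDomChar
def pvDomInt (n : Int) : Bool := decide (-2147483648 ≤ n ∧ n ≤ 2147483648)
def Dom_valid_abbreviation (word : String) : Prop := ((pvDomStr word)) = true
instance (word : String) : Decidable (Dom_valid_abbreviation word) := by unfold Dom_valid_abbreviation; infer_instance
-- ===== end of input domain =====

-- B replaces A's two-pointer digit-expansion loop by a length check plus one aligned
-- positional comparison, exploiting that the module constant abbr = "abbreviation" has no digits.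

-- ===== PORT A =====
-- the module constant abbr = "abbreviation"
def pvAbbr : List Char := "abbreviation".toList

-- inner while loop: `while j < len(abbr) and abbr[j].isdigit(): num = num*10 + int(abbr[j]); j += 1`
-- int(abbr[j]) is guarded by isdigit, so it never raises; `.getD 0` is unreachable.
def vaNumLoop (num : Int) (j : Nat) : Int × Nat :=
  if h : j < pvAbbr.length then
    if PySem.Chars.isdigit pvAbbr[j] then
      vaNumLoop (num * 10 + (PySem.Int.ofStr? (String.mk [pvAbbr[j]])).getD 0) (j + 1)
    else (num, j)
  else (num, j)
  termination_by pvAbbr.length - j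

-- fact used for termination of the outer loop: abbr contains no digit characters
theorem pvAbbr_no_digit : ∀ j : Nat, (h : j < pvAbbr.length) → PySem.Chars.isdigit pvAbbr[j] = false := by
  decide

-- outer while loop over j (i, j, num are Python ints, all provably nonnegative here: Nat)
def vaLoop (word : List Char) (i j : Nat) : Bool :=
  if h : j < pvAbbr.length then
    if hd : PySem.Chars.isdigit pvAbbr[j] then
      -- `abbr[j] == 0` compares a str with the int 0: always False in Python (exact), so fall through
      let p := vaNumLoop 0 j
      vaLoop word (i + p.1.toNat) p.2
    else
      if i ≥ word.length ∨ word[i]? ≠ some pvAbbr[j] then false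
      else vaLoop word (i + 1) (j + 1)
  else decide (i = word.length ∧ j = pvAbbr.length)
  termination_by pvAbbr.length - j
  decreasing_by
  · exact absurd hd (by simp [pvAbbr_no_digit j h])
  · omega

def valid_abbreviation (word : String) : Bool := vaLoop word.toList 0 0

-- ===== PORT B =====
def valid_abbreviation_alt (word : String) : Bool :=
  if word.toList.length ≠ pvAbbr.length then false
  else (List.range word.toList.length).all (fun i => word.toList[i]? == pvAbbr[i]?)

-- ===== PRECONDITION & SPEC =====
def Spec_valid_abbreviation (word : String) (out : Bool) : Prop := out = valid_abbreviation_alt word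
instance (word : String) (out : Bool) : Decidable (Spec_valid_abbreviation word out) := by unfold Spec_valid_abbreviation; infer_instance

-- ===== CLAIM (what is proved, stated in full; the proofs are below) =====
def Claim_equal_valid_abbreviation : Prop := ∀ (word : String), Dom_valid_abbreviation word → Spec_valid_abbreviation word (valid_abbreviation word)

-- ===== LEMMAS AND PROOFS =====

-- A's loop from position j (with i = j): decides "length matches and every remaining position matches"
theorem vaLoop_eq (w : List Char) : ∀ j, j ≤ pvAbbr.length →
    vaLoop w j j = decide (w.length = pvAbbr.length ∧ ∀ k, k < pvAbbr.length → j ≤ k → w[k]? = pvAbbr[k]?) := by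
  intro j hj
  induction hn : pvAbbr.length - j generalizing j with
  | zero =>
    have hje : j = pvAbbr.length := by omega
    subst hje
    rw [vaLoop, dif_neg (lt_irrefl _), decide_eq_decide]
    constructor
    · rintro ⟨h1, _⟩; exact ⟨h1.symm, by omega⟩
    · rintro ⟨h1, _⟩; exact ⟨h1.symm, rfl⟩
  | succ n ih =>
    have hjlt : j < pvAbbr.length := by omega
    rw [vaLoop, dif_pos hjlt, dif_neg (by simp [pvAbbr_no_digit j hjlt])]
    have hp : pvAbbr[j]? = some pvAbbr[j] := List.getElem?_eq_getElem hjlt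
    by_cases hbad : j ≥ w.length ∨ w[j]? ≠ some pvAbbr[j]
    · rw [if_pos hbad, eq_comm, decide_eq_false_iff_not]
      rintro ⟨hlen, hall⟩
      have hm := hall j hjlt le_rfl
      rw [hp] at hm
      rcases hbad with hb | hb
      · rw [List.getElem?_eq_none (by omega)] at hm; simp at hm
      · exact hb hm
    · rw [if_neg hbad]
      simp only [not_or, ge_iff_le, not_le, ne_eq, not_not] at hbad
      obtain ⟨hlt, heq⟩ := hbad
      rw [ih (j + 1) (by omega) (by omega), decide_eq_decide]
      constructor
      · rintro ⟨hlen, hall⟩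
        refine ⟨hlen, fun k hk h1 => ?_⟩
        rcases Nat.eq_or_lt_of_le h1 with he | h
        · rw [← he, heq, hp]
        · exact hall k hk (by omega)
      · rintro ⟨hlen, hall⟩
        exact ⟨hlen, fun k hk h1 => hall k hk (by omega)⟩

-- B decides the same proposition (at j = 0)
theorem alt_eq (word : String) :
    valid_abbreviation_alt word = decide (word.toList.length = pvAbbr.length ∧
      ∀ k, k < pvAbbr.length → 0 ≤ k → word.toList[k]? = pvAbbr[k]?) := by
  unfold valid_abbreviation_alt
  by_cases hlen : word.toList.length = pvAbbr.length
  · rw [if_neg (by omega), Bool.eq_iff_iff]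
    simp only [List.all_eq_true, List.mem_range, beq_iff_eq, decide_eq_true_eq]
    constructor
    · intro h; exact ⟨hlen, fun k hk _ => h k (by omega)⟩
    · rintro ⟨_, h⟩ i hi; exact h i (by omega) (by omega)
  · rw [if_pos (by omega), eq_comm, decide_eq_false_iff_not]
    rintro ⟨h, _⟩; exact hlen h

-- ===== VERDICT (by name: the statement is the Claim_ definition above) =====
theorem valid_abbreviation_spec : Claim_equal_valid_abbreviation := by
  intro word _
  unfold Spec_valid_abbreviation valid_abbreviation
  rw [vaLoop_eq word.toList 0 (by omega), alt_eq]
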